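-- pv_equiv track=rewrite | github.com/G1enB1and/MediaLens | app/mediamanager/db/tags_repo.py | _dedupe_tag_names
-- ===== SOURCE A (Python) =====
-- from typing import Iterable, List
--
-- def _clean_tag_name(name: str) -> str:
--     return str(name or "").strip()
--
-- def _has_display_case(name: str) -> bool:
--     return any(char.isupper() for char in str(name or ""))
--
-- def _preferred_tag_name(existing: str, incoming: str) -> str:
--     existing_clean = _clean_tag_name(existing)
--     incoming_clean = _clean_tag_name(incoming)
--     if not existing_clean:
--         return incoming_clean
--     if not incoming_clean:
--         return existing_clean
--     if existing_clean.casefold() != incoming_clean.casefold():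
--         return existing_clean
--     if _has_display_case(incoming_clean) and not _has_display_case(existing_clean):
--         return incoming_clean
--     return existing_clean
--
-- def _dedupe_tag_names(tag_names: Iterable[str]) -> list[str]:
--     by_key: dict[str, str] = {}
--     for raw in tag_names:
--         clean = _clean_tag_name(raw)
--         if not clean:
--             continue
--         key = clean.casefold()
--         by_key[key] = _preferred_tag_name(by_key.get(key, ""), clean)
--     return [by_key[key] for key in sorted(by_key)]
-- ===== SOURCE B (Python) =====
-- def _dedupe_tag_names(tag_names):
--     # One pass groups cleaned names per casefold key; a second pass picks,
--     # per key, the first name with display case (falling back to the first name).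
--     groups: dict[str, list[str]] = {}
--     for raw in tag_names:
--         clean = str(raw or "").strip()
--         if clean:
--             groups.setdefault(clean.casefold(), []).append(clean)
--
--     def pick(names):
--         return next((n for n in names if any(c.isupper() for c in n)), names[0])
--
--     return [pick(groups[key]) for key in sorted(groups)]
-- ===== Notes on version B (the rewrite author's own statement) =====
-- stated objective: alternative
-- what changed: A keeps one running 'best' name per casefold key, updated through a three-way preference helper on every duplicate; B instead groups all cleaned names per key in one pass and defers selection to a second pass that takes the first name with an uppercase character (else the first name), so the order-sensitive merge logic disappears.
import Mathlib
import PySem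

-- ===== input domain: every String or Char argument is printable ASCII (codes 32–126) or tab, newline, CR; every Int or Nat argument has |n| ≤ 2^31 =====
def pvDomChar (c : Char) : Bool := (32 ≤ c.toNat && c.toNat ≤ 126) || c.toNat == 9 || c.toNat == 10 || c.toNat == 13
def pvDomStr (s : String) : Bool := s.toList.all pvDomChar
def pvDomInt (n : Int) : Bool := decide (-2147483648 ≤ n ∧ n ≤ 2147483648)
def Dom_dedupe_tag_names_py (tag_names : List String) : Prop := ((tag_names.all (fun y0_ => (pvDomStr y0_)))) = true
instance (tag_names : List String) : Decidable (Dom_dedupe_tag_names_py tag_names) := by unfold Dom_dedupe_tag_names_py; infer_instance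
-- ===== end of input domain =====

-- B groups the cleaned names per casefold key in one pass and selects per key in a
-- second pass (first name with display case, else the first name), instead of A's
-- running per-key preference merge; same results, similar cost (objective: alternative).


-- ===== PORT A =====
-- _clean_tag_name: str(name or "").strip()  ('name or ""' is name unless name is falsy, i.e. empty)
def pvCleanA (name : String) : String := PySem.Str.strip (if name = "" then "" else name)

-- _has_display_case: any(char.isupper() for char in str(name or ""))
def pvHasDisplayCaseA (name : String) : Bool :=
  (if name = "" then "" else name).toList.any PySem.Chars.isupper

-- _preferred_tag_name  (str.casefold ported as PySem.Str.lower: exact on the ASCII domain)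
def pvPreferredA (existing incoming : String) : String :=
  let existing_clean := pvCleanA existing
  let incoming_clean := pvCleanA incoming
  if existing_clean = "" then incoming_clean
  else if incoming_clean = "" then existing_clean
  else if PySem.Str.lower existing_clean ≠ PySem.Str.lower incoming_clean then existing_clean
  else if pvHasDisplayCaseA incoming_clean && !pvHasDisplayCaseA existing_clean then incoming_clean
  else existing_clean

-- the loop body of _dedupe_tag_names
def pvStepA (by_key : PySem.Dict String String) (raw : String) : PySem.Dict String String :=
  let clean := pvCleanA raw
  if clean = "" then by_key
  else
    let key := PySem.Str.lower clean
    by_key.insert key (pvPreferredA (by_key.getD key "") clean)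

-- the return expression: [by_key[key] for key in sorted(by_key)]
-- (every key is present in by_key, so getD's default is never read)
def pvFinishA (by_key : PySem.Dict String String) : List String :=
  (PySem.List.sorted by_key.keys (fun k => k) false).map (fun key => by_key.getD key "")

def dedupe_tag_names_py (tag_names : List String) : List String :=
  pvFinishA (tag_names.foldl pvStepA PySem.Dict.empty)

-- ===== PORT B =====
def pvHasUpperB (n : String) : Bool := n.toList.any PySem.Chars.isupper

-- pick: next((n for n in names if any(c.isupper() for c in n)), names[0]);
-- names is never empty where pick is called, so headD's default is never read
def pvPickB (names : List String) : String := (names.find? pvHasUpperB).getD (names.headD "")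

-- the grouping loop body: groups.setdefault(clean.casefold(), []).append(clean)
def pvStepB (groups : PySem.Dict String (List String)) (raw : String) : PySem.Dict String (List String) :=
  let clean := PySem.Str.strip (if raw = "" then "" else raw)
  if clean = "" then groups
  else groups.modify (PySem.Str.lower clean) [] (fun l => l ++ [clean])

-- the return expression: [pick(groups[key]) for key in sorted(groups)]
def pvFinishB (groups : PySem.Dict String (List String)) : List String :=
  (PySem.List.sorted groups.keys (fun k => k) false).map (fun key => pvPickB (groups.getD key []))

def dedupe_tag_names_py_alt (tag_names : List String) : List String :=
  pvFinishB (tag_names.foldl pvStepB PySem.Dict.empty)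

-- ===== PRECONDITION & SPEC =====
def Spec_dedupe_tag_names_py (tag_names : List String) (out : List String) : Prop := out = dedupe_tag_names_py_alt tag_names
instance (tag_names : List String) (out : List String) : Decidable (Spec_dedupe_tag_names_py tag_names out) := by unfold Spec_dedupe_tag_names_py; infer_instance

-- ===== CLAIM (what is proved, stated in full; the proofs are below) =====
def Claim_equal_dedupe_tag_names_py : Prop := ∀ (tag_names : List String), Dom_dedupe_tag_names_py tag_names → Spec_dedupe_tag_names_py tag_names (dedupe_tag_names_py tag_names)

-- ===== LEMMAS AND PROOFS =====

-- dropping a false-prefix twice drops it once (no induction: the head of the rest fails p)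
lemma pvDropWhile_idem (p : Char → Bool) (l : List Char) :
    (l.dropWhile p).dropWhile p = l.dropWhile p := by
  cases h : l.dropWhile p with
  | nil => simp
  | cons a t =>
      have ha : p a = false := by
        have := List.head_dropWhile_not p (l := l) (by rw [h]; simp)
        simpa [h] using this
      simp [ha]

lemma pvStrip_chars_idem (s : List Char) :
    PySem.Chars.strip (PySem.Chars.strip s) = PySem.Chars.strip s := by
  simp only [PySem.Chars.strip, PySem.Chars.lstrip, PySem.Chars.rstrip]
  set p := PySem.Chars.isspace
  set u := s.dropWhile p with hu
  set m := u.reverse.dropWhile p with hm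
  -- first: the left strip of m.reverse is a no-op (its head is the head of u)
  have hl : m.reverse.dropWhile p = m.reverse := by
    cases hmr : m.reverse with
    | nil => simp
    | cons a rest =>
        obtain ⟨t, ht⟩ := List.dropWhile_suffix (l := u.reverse) p
        have hu2 : u = m.reverse ++ t.reverse := by
          have := congrArg List.reverse ht
          simpa [hm] using this.symm
        have hua : u = a :: (rest ++ t.reverse) := by rw [hu2, hmr]; simp
        have hds : s.dropWhile p = a :: (rest ++ t.reverse) := by rw [← hu]; exact hua
        have hne : s.dropWhile p ≠ [] := by rw [hds]; simp
        have hpa : p a = false := by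
          have := List.head_dropWhile_not p (l := s) hne
          simp only [hds, List.head_cons] at this
          simpa using this
        simp [hpa]
  rw [hl]
  rw [List.reverse_reverse]
  rw [pvDropWhile_idem]

lemma pvStrip_idem (s : String) : PySem.Str.strip (PySem.Str.strip s) = PySem.Str.strip s := by
  apply String.toList_inj.mp
  simp only [PySem.Str.toList_strip]
  exact pvStrip_chars_idem s.toList

lemma pvHasDisplayCase_eq (x : String) : pvHasDisplayCaseA x = pvHasUpperB x := by
  by_cases h : x = "" <;> simp [pvHasDisplayCaseA, pvHasUpperB, h]

lemma pvPick_mem {l : List String} (h : l ≠ []) : pvPickB l ∈ l := by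
  unfold pvPickB
  cases hf : l.find? pvHasUpperB with
  | some m => simpa using List.mem_of_find?_eq_some hf
  | none =>
      simp only [Option.getD_none]
      cases l with
      | nil => exact absurd rfl h
      | cons a t => simp

lemma pvPick_append {l : List String} (c : String) (h : l ≠ []) :
    pvPickB (l ++ [c]) =
      if pvHasUpperB c && !pvHasUpperB (pvPickB l) then c else pvPickB l := by
  unfold pvPickB
  rw [List.find?_append]
  cases hf : l.find? pvHasUpperB with
  | some m =>
      have hm : pvHasUpperB m = true := List.find?_some hf
      simp [hm]
  | none =>
      have hall := List.find?_eq_none.mp hf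
      obtain ⟨a, t, rfl⟩ : ∃ a t, l = a :: t := by
        cases l with
        | nil => exact absurd rfl h
        | cons a t => exact ⟨a, t, rfl⟩
      have ha : pvHasUpperB a = false := by simpa using hall a (by simp)
      by_cases hc : pvHasUpperB c = true
      · simp [List.find?, hc, ha]
      · have hc' : pvHasUpperB c = false := by simpa using hc
        simp [List.find?, hc', ha]

-- the loop invariant relating A's dict to B's dict
def pvInv (dA : PySem.Dict String String) (dB : PySem.Dict String (List String)) : Prop :=
  dA.keys = dB.keys ∧ ∀ k ∈ dA.keys,
    (dB.getD k [] ≠ [] ∧ dA.getD k "" = pvPickB (dB.getD k []) ∧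
      ∀ x ∈ dB.getD k [], PySem.Str.strip x = x ∧ x ≠ "" ∧ PySem.Str.lower x = k)

lemma pvPreferred_reduce {v c : String}
    (hv : PySem.Str.strip v = v) (hvne : v ≠ "")
    (hc : PySem.Str.strip c = c) (hcne : c ≠ "")
    (hlow : PySem.Str.lower v = PySem.Str.lower c) :
    pvPreferredA v c = if pvHasUpperB c && !pvHasUpperB v then c else v := by
  have h1 : pvCleanA v = v := by simp [pvCleanA, hvne, hv]
  have h2 : pvCleanA c = c := by simp [pvCleanA, hcne, hc]
  simp [pvPreferredA, h1, h2, hvne, hcne, hlow, pvHasDisplayCase_eq]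

lemma pvPreferred_empty (c : String)
    (hc : PySem.Str.strip c = c) : pvPreferredA "" c = c := by
  have h0 : pvCleanA "" = "" := by simp [pvCleanA]; rfl
  have h2 : pvCleanA c = c := by
    by_cases hcne : c = ""
    · rw [hcne]; exact h0
    · simp [pvCleanA, hcne, hc]
  simp [pvPreferredA, h0, h2]

lemma pvPick_singleton (c : String) : pvPickB [c] = c := by
  cases hu : pvHasUpperB c <;> simp [pvPickB, List.find?, hu]

lemma pvInv_step {dA : PySem.Dict String String} {dB : PySem.Dict String (List String)}
    (h : pvInv dA dB) (raw : String) : pvInv (pvStepA dA raw) (pvStepB dB raw) := by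
  obtain ⟨hkeys, hval⟩ := h
  unfold pvStepA pvStepB
  simp only [pvCleanA]
  set c := PySem.Str.strip (if raw = "" then "" else raw) with hcdef
  by_cases hc : c = ""
  · simp only [hc, if_true]; exact ⟨hkeys, hval⟩
  · simp only [if_neg hc]
    set k0 := PySem.Str.lower c with hk0
    have hcstrip : PySem.Str.strip c = c := by rw [hcdef]; exact pvStrip_idem _
    have hcont : dA.contains k0 = dB.contains k0 := by
      rw [PySem.Dict.contains_eq_decide_mem_keys, PySem.Dict.contains_eq_decide_mem_keys, hkeys]
    have hkeysB := PySem.Dict.keys_modify dB k0 [] (fun l => l ++ [c])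
    by_cases hmem : k0 ∈ dA.keys
    · have hcA : dA.contains k0 = true := by
        rw [PySem.Dict.contains_eq_decide_mem_keys]; simpa using hmem
      have hcB : dB.contains k0 = true := by rw [← hcont]; exact hcA
      obtain ⟨hne, hpv, hels⟩ := hval k0 hmem
      constructor
      · rw [PySem.Dict.keys_insert_of_contains _ _ hcA, hkeysB,
            PySem.Dict.keys_insert_of_contains _ _ hcB, hkeys]
      · intro k hk
        rw [PySem.Dict.keys_insert_of_contains _ _ hcA] at hk
        rw [PySem.Dict.getD_insert, PySem.Dict.getD_modify]
        by_cases hkk : k = k0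
        · subst hkk
          simp only [if_true]
          have hvmem := pvPick_mem hne
          obtain ⟨hstripv, hvne, hlowv⟩ := hels _ hvmem
          refine ⟨by simp, ?_, ?_⟩
          · rw [hpv, pvPick_append c hne]
            exact pvPreferred_reduce hstripv hvne hcstrip hc (hlowv.trans hk0)
          · intro x hx
            rcases List.mem_append.mp hx with hx | hx
            · exact hels x hx
            · rw [List.mem_singleton.mp hx]; exact ⟨hcstrip, hc, rfl⟩
        · simp only [if_neg hkk]
          exact hval k hk
    · have hcA : dA.contains k0 = false := by
        rw [PySem.Dict.contains_eq_decide_mem_keys]; simpa using hmem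
      have hcB : dB.contains k0 = false := by rw [← hcont]; exact hcA
      have hgA : dA.getD k0 "" = "" := PySem.Dict.getD_of_not_contains dA "" hcA
      have hgB : dB.getD k0 [] = [] := PySem.Dict.getD_of_not_contains dB [] hcB
      constructor
      · rw [PySem.Dict.keys_insert_of_not_contains _ _ hcA, hkeysB,
            PySem.Dict.keys_insert_of_not_contains _ _ hcB, hkeys]
      · intro k hk
        rw [PySem.Dict.keys_insert_of_not_contains _ _ hcA] at hk
        rw [PySem.Dict.getD_insert, PySem.Dict.getD_modify]
        by_cases hkk : k = k0
        · subst hkk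
          simp only [if_true, hgA, hgB, List.nil_append]
          refine ⟨by simp, ?_, ?_⟩
          · rw [pvPreferred_empty c hcstrip, pvPick_singleton]
          · intro x hx
            rw [List.mem_singleton.mp hx]; exact ⟨hcstrip, hc, rfl⟩
        · simp only [if_neg hkk]
          have hk' : k ∈ dA.keys := by
            rcases List.mem_append.mp hk with hk | hk
            · exact hk
            · exact absurd (List.mem_singleton.mp hk) hkk
          exact hval k hk'

lemma pvInv_foldl (ts : List String) :
    ∀ {dA : PySem.Dict String String} {dB : PySem.Dict String (List String)},
      pvInv dA dB → pvInv (ts.foldl pvStepA dA) (ts.foldl pvStepB dB) := by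
  induction ts with
  | nil => intro _ _ h; exact h
  | cons t ts ih => intro dA dB h; exact ih (pvInv_step h t)

lemma pvInv_empty : pvInv PySem.Dict.empty PySem.Dict.empty := by
  constructor
  · rfl
  · intro k hk
    simp [PySem.Dict.keys, PySem.Dict.empty] at hk

-- ===== VERDICT (by name: the statement is the Claim_ definition above) =====
theorem dedupe_tag_names_py_spec : Claim_equal_dedupe_tag_names_py := by
  intro tag_names _
  unfold Spec_dedupe_tag_names_py dedupe_tag_names_py dedupe_tag_names_py_alt pvFinishA pvFinishB
  obtain ⟨hkeys, hval⟩ := pvInv_foldl tag_names pvInv_empty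
  rw [hkeys]
  refine List.map_congr_left ?_
  intro key hkey
  have hk : key ∈ (tag_names.foldl pvStepA PySem.Dict.empty).keys := by
    rw [hkeys]; exact (PySem.List.mem_sorted _ _ _ _).mp hkey
  exact (hval key hk).2.1
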